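-- pv_equiv track=rewrite | github.com/fedemengo/.dotfiles | scripts/git_split_by_group.py | rewrite_todo_lines
-- ===== SOURCE A (Python) =====
-- def rewrite_todo_lines(lines: list[str], target_commits: set[str]) -> list[str]:
--     rewritten: list[str] = []
--     for line in lines:
--         if not line.startswith("pick "):
--             rewritten.append(line)
--             continue
--
--         parts = line.split(maxsplit=2)
--         if len(parts) < 2:
--             rewritten.append(line)
--             continue
--
--         short_commit = parts[1]
--         if any(commit.startswith(short_commit) for commit in target_commits):
--             rewritten.append(f"edit {line[5:]}")
--             continue
--
--         rewritten.append(line)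
--     return rewritten
-- ===== SOURCE B (Python) =====
-- def rewrite_todo_lines(lines: list[str], target_commits: set[str]) -> list[str]:
--     # Index all prefixes of the target commits once; each pick line is then one set lookup
--     prefixes = {c[:i] for c in target_commits for i in range(len(c) + 1)}
--     out: list[str] = []
--     for line in lines:
--         if line.startswith("pick "):
--             parts = line.split(maxsplit=2)
--             if len(parts) >= 2 and parts[1] in prefixes:
--                 out.append("edit " + line[5:])
--                 continue
--         out.append(line)
--     return out
-- ===== Notes on version B (the rewrite author's own statement) =====
-- stated objective: alternative
-- what changed: B precomputes a set of all prefixes of the target commits once, replacing A's per-line any()-scan over target_commits with a single set membership lookup per pick line; it trades the scan for upfront index-building work.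
import Mathlib
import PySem

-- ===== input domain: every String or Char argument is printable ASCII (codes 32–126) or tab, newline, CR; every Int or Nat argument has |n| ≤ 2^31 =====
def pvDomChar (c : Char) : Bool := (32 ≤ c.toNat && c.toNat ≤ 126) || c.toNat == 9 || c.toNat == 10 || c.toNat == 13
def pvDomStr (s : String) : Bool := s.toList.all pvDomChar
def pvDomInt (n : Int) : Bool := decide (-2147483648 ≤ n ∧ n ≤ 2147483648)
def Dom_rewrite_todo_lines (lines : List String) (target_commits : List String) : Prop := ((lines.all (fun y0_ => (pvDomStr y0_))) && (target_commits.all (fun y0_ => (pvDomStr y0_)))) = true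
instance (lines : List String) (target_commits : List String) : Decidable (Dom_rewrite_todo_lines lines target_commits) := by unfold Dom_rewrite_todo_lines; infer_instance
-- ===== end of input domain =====

-- B replaces the per-line any()-scan over target_commits by one precomputed set of all their prefixes (one membership lookup per pick line); a different algorithm of similar measured cost.

-- ===== PORT A =====
def pvAstep (target_commits : List String) (acc : List String) (line : String) : List String :=
  if !(PySem.Str.startswith line "pick ") then acc ++ [line]
  else
    let parts := PySem.Str.split₀Max line 2
    if parts.length < 2 then acc ++ [line]
    else
      let short_commit := (PySem.List.pyGet? parts 1).getD ""
      if target_commits.any (fun commit => PySem.Str.startswith commit short_commit) then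
        acc ++ [String.ofList ("edit ".toList ++ line.toList.drop 5)]
      else acc ++ [line]

def rewrite_todo_lines (lines : List String) (target_commits : List String) : List String :=
  lines.foldl (pvAstep target_commits) []

-- ===== PORT B =====
def pvBprefixes (target_commits : List String) : PySem.Set String :=
  PySem.Set.ofList (target_commits.flatMap (fun c =>
    (List.range (c.toList.length + 1)).map (fun i => String.ofList (c.toList.take i))))

def pvBstep (prefixes : PySem.Set String) (out : List String) (line : String) : List String :=
  if PySem.Str.startswith line "pick " then
    let parts := PySem.Str.split₀Max line 2
    if 2 ≤ parts.length && PySem.Set.contains prefixes ((PySem.List.pyGet? parts 1).getD "") then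
      out ++ [String.ofList ("edit ".toList ++ line.toList.drop 5)]
    else out ++ [line]
  else out ++ [line]

def rewrite_todo_lines_alt (lines : List String) (target_commits : List String) : List String :=
  lines.foldl (pvBstep (pvBprefixes target_commits)) []

-- ===== PRECONDITION & SPEC =====
def Spec_rewrite_todo_lines (lines : List String) (target_commits : List String) (out : List String) : Prop := out = rewrite_todo_lines_alt lines target_commits
instance (lines : List String) (target_commits : List String) (out : List String) : Decidable (Spec_rewrite_todo_lines lines target_commits out) := by unfold Spec_rewrite_todo_lines; infer_instance

-- ===== CLAIM (what is proved, stated in full; the proofs are below) =====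
def Claim_equal_rewrite_todo_lines : Prop := ∀ (lines : List String) (target_commits : List String), Dom_rewrite_todo_lines lines target_commits → Spec_rewrite_todo_lines lines target_commits (rewrite_todo_lines lines target_commits)

-- ===== LEMMAS AND PROOFS =====

-- membership in the prefix set = some target starts with p
theorem contains_pvBprefixes (ts : List String) (p : String) :
    PySem.Set.contains (pvBprefixes ts) p
      = ts.any (fun commit => PySem.Str.startswith commit p) := by
  rw [Bool.eq_iff_iff]
  simp only [pvBprefixes, PySem.Set.contains, PySem.Set.mem_ofList, List.contains_eq_mem,
    decide_eq_true_eq, List.mem_flatMap, List.mem_map, List.mem_range, List.any_eq_true,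
    PySem.Str.startswith_eq, PySem.Chars.startswith_iff]
  constructor
  · rintro ⟨c, hc, i, _, rfl⟩
    exact ⟨c, hc, by simpa using List.take_prefix i c.toList⟩
  · rintro ⟨c, hc, hp⟩
    refine ⟨c, hc, p.toList.length, by have := hp.length_le; omega, ?_⟩
    rw [← List.prefix_iff_eq_take.mp hp]
    exact String.ofList_toList

theorem step_eq (ts : List String) (acc : List String) (line : String) :
    pvAstep ts acc line = pvBstep (pvBprefixes ts) acc line := by
  unfold pvAstep pvBstep
  simp only [contains_pvBprefixes]
  by_cases hs : PySem.Chars.startswith line.toList ['p', 'i', 'c', 'k', ' '] = true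
  · by_cases hl : (PySem.Str.split₀Max line 2).length < 2
    · have hd : (decide (2 ≤ (PySem.Str.split₀Max line 2).length)) = false := by
        simp; omega
      simp [hs, hl, hd]
    · have hd : (decide (2 ≤ (PySem.Str.split₀Max line 2).length)) = true := by
        simp; omega
      simp [hs, hl, hd]
  · simp [hs]

-- ===== VERDICT (by name: the statement is the Claim_ definition above) =====
theorem rewrite_todo_lines_spec : Claim_equal_rewrite_todo_lines := by
  intro lines ts _
  show rewrite_todo_lines lines ts = rewrite_todo_lines_alt lines ts
  unfold rewrite_todo_lines rewrite_todo_lines_alt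
  have h : pvAstep ts = pvBstep (pvBprefixes ts) :=
    funext fun acc => funext fun line => step_eq ts acc line
  rw [h]
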